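-- pv_equiv track=rewrite | github.com/noelillinger/dadpoker | backend/poker/utils.py | distribute_side_pots
-- ===== SOURCE A (Python) =====
-- def distribute_side_pots(contributions: dict[str, int], winners: list[str]) -> dict[str, int]:
--     # Very simple side-pot distribution that handles all-in ordering and split between winners.
--     # contributions: player_id -> total chips put in this hand
--     # returns: player_id -> amount won (net from pots, not net profit)
--     if not contributions:
--         return {}
--     # sort players by contribution asc (all-in order)
--     layers = sorted(set(contributions.values()))
--     payouts = {pid: 0 for pid in contributions.keys()}
--     prev = 0
--     for layer in layers:
--         layer_amount = layer - prev
--         # players eligible in this layer are those who contributed >= layer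
--         eligible = [pid for pid, c in contributions.items() if c >= layer]
--         pot_size = layer_amount * len(eligible)
--         if not eligible:
--             continue
--         share = pot_size // max(1, len(winners))
--         for w in winners:
--             if w in eligible:
--                 payouts[w] += share
--         prev = layer
--     return payouts
-- ===== SOURCE B (Python) =====
-- def distribute_side_pots(contributions: dict[str, int], winners: list[str]) -> dict[str, int]:
--     vals = sorted(contributions.values())
--     n = len(vals)
--     den = max(1, len(winners))
--     # single pass over the sorted values: distinct layers with cumulative per-winner payout
--     layers = []
--     cums = []
--     prev = 0
--     cum = 0
--     i = 0
--     while i < n: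
--         v = vals[i]
--         cum += (v - prev) * (n - i) // den
--         layers.append(v)
--         cums.append(cum)
--         prev = v
--         while i < n and vals[i] == v:
--             i += 1
--     wins = {}
--     for w in winners:
--         wins[w] = wins.get(w, 0) + 1
--     out = {}
--     for pid, c in contributions.items():
--         lo, hi = 0, len(layers)
--         while lo < hi:
--             mid = (lo + hi) // 2
--             if layers[mid] <= c:
--                 lo = mid + 1
--             else:
--                 hi = mid
--         out[pid] = wins.get(pid, 0) * (cums[lo - 1] if lo > 0 else 0)
--     return out
-- ===== Notes on version B (the rewrite author's own statement) =====
-- stated objective: faster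
-- what changed: A rescans every contribution and every winner once per distinct layer (and re-checks 'w in eligible' by a linear scan); B sorts the values once, builds the distinct layers with cumulative per-winner-occurrence payouts in a single pass over the sorted values, counts winner multiplicities in a dict, and answers each player's payout with one binary search over the layers.
import Mathlib
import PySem

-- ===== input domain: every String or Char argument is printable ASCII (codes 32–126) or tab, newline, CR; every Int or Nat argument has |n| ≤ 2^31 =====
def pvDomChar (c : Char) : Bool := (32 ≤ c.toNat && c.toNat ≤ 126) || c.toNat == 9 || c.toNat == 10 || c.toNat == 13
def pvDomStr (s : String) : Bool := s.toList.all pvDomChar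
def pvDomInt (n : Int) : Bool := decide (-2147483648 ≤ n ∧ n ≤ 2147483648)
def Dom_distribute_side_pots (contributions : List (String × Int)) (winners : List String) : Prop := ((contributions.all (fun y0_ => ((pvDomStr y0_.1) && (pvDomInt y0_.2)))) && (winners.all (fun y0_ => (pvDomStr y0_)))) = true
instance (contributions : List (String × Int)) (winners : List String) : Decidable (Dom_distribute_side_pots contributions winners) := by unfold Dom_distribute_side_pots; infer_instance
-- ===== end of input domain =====

-- B replaces A's per-layer rescans of all contributions and winners by one sort of the values,
-- a single pass building per-layer cumulative payouts, a winner-multiplicity dict and a binary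
-- search per player; equivalence of the returned dict is proved on all inputs.

-- ===== PORT A =====
-- A's loop body over one layer, hoisted into a helper (same code).
-- 'payouts[w] += share' only runs for w ∈ eligible ⊆ payouts' keys, so 'modify w 0 (· + share)' is exact.
def pvStepA (d : PySem.Dict String Int) (winners : List String)
    (st : PySem.Dict String Int × Int) (layer : Int) : PySem.Dict String Int × Int :=
  let layer_amount := layer - st.2
  let eligible := (d.items.filter (fun pc => decide (layer ≤ pc.2))).map (fun pc => pc.1)
  let pot_size := layer_amount * (eligible.length : Int)
  if eligible = [] then st
  else
    let share := PySem.Int.floordiv pot_size (max 1 (winners.length : Int))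
    (winners.foldl (fun p w => if eligible.contains w then p.modify w 0 (fun x => x + share) else p) st.1, layer)

def distribute_side_pots (contributions : List (String × Int)) (winners : List String) : List (String × Int) :=
  let d := PySem.Dict.ofList contributions
  if d.items = [] then []
  else
    let layers := PySem.List.sorted (PySem.Set.ofList d.values) (fun x => x)
    let payouts := d.keys.foldl (fun p pid => p.insert pid 0) PySem.Dict.empty
    let r := layers.foldl (pvStepA d winners) (payouts, 0)
    r.1.items

-- ===== PORT B =====
-- Source B's outer while-loop over the sorted values, as a recursion on the remaining suffix
-- (the inner 'while vals[i] == v' run-skip is the dropWhile; n - i is the suffix length).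
def pvRows (den : Int) : List Int → Int → Int → List Int × List Int
  | [], _, _ => ([], [])
  | v :: rest, prev, cum =>
    let cum' := cum + PySem.Int.floordiv ((v - prev) * ((rest.length : Int) + 1)) den
    let r := pvRows den (rest.dropWhile (fun x => x == v)) v cum'
    (v :: r.1, cum' :: r.2)
termination_by s => s.length
decreasing_by
  exact Nat.lt_succ_of_le (List.length_dropWhile_le _ _)

-- Source B's binary-search while-loop; every call keeps mid < hi ≤ layers.length, so getD indexing is exact.
def pvBisect (layers : List Int) (c : Int) (lo hi : Nat) : Nat :=
  if _h : lo < hi then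
    let mid := (lo + hi) / 2
    if layers.getD mid 0 ≤ c then pvBisect layers c (mid + 1) hi
    else pvBisect layers c lo mid
  else lo
termination_by hi - lo
decreasing_by
  · omega
  · omega

def distribute_side_pots_alt (contributions : List (String × Int)) (winners : List String) : List (String × Int) :=
  let d := PySem.Dict.ofList contributions
  let vals := PySem.List.sorted d.values (fun x => x)
  let den : Int := max 1 (winners.length : Int)
  let rows := pvRows den vals 0 0
  let wins := winners.foldl (fun (w : PySem.Dict String Int) x => w.insert x (w.getD x 0 + 1)) PySem.Dict.empty
  let out := d.items.foldl (fun (o : PySem.Dict String Int) pc =>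
    let lo := pvBisect rows.1 pc.2 0 rows.1.length
    o.insert pc.1 (wins.getD pc.1 0 * (if 0 < lo then rows.2.getD (lo - 1) 0 else 0))) PySem.Dict.empty
  out.items

-- ===== PRECONDITION & SPEC =====
def Spec_distribute_side_pots (contributions : List (String × Int)) (winners : List String) (out : List (String × Int)) : Prop := out = distribute_side_pots_alt contributions winners
instance (contributions : List (String × Int)) (winners : List String) (out : List (String × Int)) : Decidable (Spec_distribute_side_pots contributions winners out) := by unfold Spec_distribute_side_pots; infer_instance

-- ===== CLAIM (what is proved, stated in full; the proofs are below) =====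
def Claim_equal_distribute_side_pots : Prop := ∀ (contributions : List (String × Int)) (winners : List String), Dom_distribute_side_pots contributions winners → Spec_distribute_side_pots contributions winners (distribute_side_pots contributions winners)

-- ===== LEMMAS AND PROOFS =====

def pvElig (vals : List Int) (l : Int) : Int := (vals.countP (fun x => decide (l ≤ x)) : Int)

def pvSum (vals : List Int) (den c : Int) : List Int → Int → Int
  | [], _ => 0
  | l :: ls, prev =>
    (if l ≤ c then PySem.Int.floordiv ((l - prev) * pvElig vals l) den else 0) + pvSum vals den c ls l

theorem pvSum_zero (vals : List Int) (den c : Int) :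
    ∀ (L : List Int) (prev : Int), (∀ l ∈ L, ¬ l ≤ c) → pvSum vals den c L prev = 0 := by
  intro L
  induction L with
  | nil => intro prev _; rfl
  | cons l ls ih =>
    intro prev h
    simp only [pvSum, if_neg (h l (by simp)), ih l (fun x hx => h x (by simp [hx])), zero_add]

theorem pv_dropWhile_head {α : Type} (p : α → Bool) :
    ∀ (l : List α) (y : α) (t : List α), l.dropWhile p = y :: t → p y = false := by
  intro l
  induction l with
  | nil => intro y t h; simp [List.dropWhile] at h
  | cons a l ih =>
    intro y t h
    rw [List.dropWhile_cons] at h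
    by_cases hp : p a
    · simp only [hp, if_true] at h; exact ih y t h
    · simp only [hp] at h
      cases h
      simpa using hp

theorem pvRows_spec (vals0 : List Int) (den : Int) :
    ∀ (n : Nat) (s : List Int), s.length ≤ n → s.Pairwise (· ≤ ·) →
    (∀ l ∈ s, vals0.countP (fun x => decide (l ≤ x)) = s.countP (fun x => decide (l ≤ x))) →
    ∀ (prev cum : Int),
      (∀ l, l ∈ (pvRows den s prev cum).1 ↔ l ∈ s) ∧
      (pvRows den s prev cum).1.Pairwise (· < ·) ∧
      ∀ c : Int,
        (if 0 < (pvRows den s prev cum).1.countP (fun l => decide (l ≤ c)) then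
           (pvRows den s prev cum).2.getD ((pvRows den s prev cum).1.countP (fun l => decide (l ≤ c)) - 1) 0
         else 0)
        = (if 0 < (pvRows den s prev cum).1.countP (fun l => decide (l ≤ c)) then cum else 0)
          + pvSum vals0 den c (pvRows den s prev cum).1 prev := by
  intro n
  induction n with
  | zero =>
    intro s hlen _ _ prev cum
    have hs : s = [] := List.eq_nil_of_length_eq_zero (by omega)
    subst hs
    refine ⟨by simp [pvRows], by simp [pvRows], ?_⟩
    intro c
    simp [pvRows, pvSum]
  | succ n ih =>
    intro s hlen hPW hcnt prev cum
    cases s with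
    | nil =>
      refine ⟨by simp [pvRows], by simp [pvRows], ?_⟩
      intro c
      simp [pvRows, pvSum]
    | cons v rest =>
      have hvle : ∀ x ∈ rest, v ≤ x := (List.pairwise_cons.mp hPW).1
      have hrestPW : rest.Pairwise (· ≤ ·) := (List.pairwise_cons.mp hPW).2
      set t := rest.dropWhile (fun x => x == v) with ht
      have htsub : t.Sublist rest := List.dropWhile_sublist _
      have htmem : ∀ x ∈ t, x ∈ rest := fun x hx => htsub.mem hx
      have htPW : t.Pairwise (· ≤ ·) := hrestPW.sublist htsub
      have hvt : ∀ x ∈ t, v < x := by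
        cases hteq : t with
        | nil => intro x hx; cases hx
        | cons y t' =>
          have hy : (y == v) = false := pv_dropWhile_head _ rest y t' (by rw [← ht, hteq])
          have hyv : v < y := by
            have : v ≤ y := hvle y (htmem y (by rw [hteq]; simp))
            rcases lt_or_eq_of_le this with h | h
            · exact h
            · exfalso; rw [← h] at hy; simp at hy
          have htPW' := htPW
          rw [hteq] at htPW'
          intro x hx
          rcases List.mem_cons.mp hx with rfl | hx'
          · exact hyv
          · have : y ≤ x := (List.pairwise_cons.mp htPW').1 x hx'
            omega
      have hsplit : rest = rest.takeWhile (fun x => x == v) ++ t := (List.takeWhile_append_dropWhile).symm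
      have htw : ∀ x ∈ rest.takeWhile (fun x => x == v), x = v := by
        intro x hx
        have := List.mem_takeWhile_imp hx
        exact eq_of_beq this
      have hsmem : ∀ l : Int, l ∈ v :: rest ↔ l = v ∨ l ∈ t := by
        intro l
        constructor
        · intro h
          rcases List.mem_cons.mp h with rfl | h'
          · exact Or.inl rfl
          · rw [hsplit] at h'
            rcases List.mem_append.mp h' with h'' | h''
            · exact Or.inl (htw l h'')
            · exact Or.inr h''
        · intro h
          rcases h with rfl | h'
          · simp
          · exact List.mem_cons.mpr (Or.inr (htmem l h'))
      have hcnt_t : ∀ l ∈ t, vals0.countP (fun x => decide (l ≤ x)) = t.countP (fun x => decide (l ≤ x)) := by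
        intro l hl
        have hvl : v < l := hvt l hl
        have h1 := hcnt l ((hsmem l).mpr (Or.inr hl))
        rw [h1, List.countP_cons, if_neg (by simp; omega)]
        conv_lhs => rw [hsplit]
        rw [List.countP_append]
        have : (rest.takeWhile (fun x => x == v)).countP (fun x => decide (l ≤ x)) = 0 := by
          rw [List.countP_eq_zero]
          intro a ha
          rw [htw a ha]
          simp; omega
        omega
      have hlen_cnt : vals0.countP (fun x => decide (v ≤ x)) = rest.length + 1 := by
        rw [hcnt v (by simp)]
        have : (v :: rest).countP (fun x => decide (v ≤ x)) = (v :: rest).length := by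
          rw [List.countP_eq_length]
          intro a ha
          rcases List.mem_cons.mp ha with rfl | h
          · simp
          · simp [hvle a h]
        rw [this, List.length_cons]
      -- unfold one step of pvRows
      have hunf : pvRows den (v :: rest) prev cum
          = (v :: (pvRows den t v (cum + PySem.Int.floordiv ((v - prev) * ((rest.length : Int) + 1)) den)).1,
             (cum + PySem.Int.floordiv ((v - prev) * ((rest.length : Int) + 1)) den)
               :: (pvRows den t v (cum + PySem.Int.floordiv ((v - prev) * ((rest.length : Int) + 1)) den)).2) := by
        rw [pvRows]
      set cum' := cum + PySem.Int.floordiv ((v - prev) * ((rest.length : Int) + 1)) den with hcum'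
      obtain ⟨ihmem, ihPW, ihcums⟩ :=
        ih t (by have := htsub.length_le; simp at hlen ⊢; omega) htPW hcnt_t v cum'
      set r := pvRows den t v cum' with hr
      have hshare : PySem.Int.floordiv ((v - prev) * ((rest.length : Int) + 1)) den
          = PySem.Int.floordiv ((v - prev) * pvElig vals0 v) den := by
        unfold pvElig
        rw [hlen_cnt]
        push_cast
        ring_nf
      refine ⟨?_, ?_, ?_⟩
      · intro l
        have h := hsmem l
        rw [List.mem_cons] at h
        rw [hunf]
        simp only [List.mem_cons, ihmem]
        tauto
      · rw [hunf]
        exact List.pairwise_cons.mpr ⟨fun x hx => hvt x ((ihmem x).mp hx), ihPW⟩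
      · intro c
        rw [hunf]
        have h2 := ihcums c
        simp only [List.countP_cons]
        by_cases hv : v ≤ c
        · rw [if_pos (show (decide (v ≤ c)) = true by simp [hv])]
          generalize hK : List.countP (fun l => decide (l ≤ c)) r.1 = K at h2 ⊢
          rw [if_pos (by omega : 0 < K + 1), if_pos (by omega : 0 < K + 1)]
          have hsum : pvSum vals0 den c (v :: r.1) prev
              = PySem.Int.floordiv ((v - prev) * pvElig vals0 v) den + pvSum vals0 den c r.1 v := by
            simp only [pvSum, if_pos hv]
          rw [hsum]
          by_cases hkpos : 0 < K
          · rw [if_pos hkpos, if_pos hkpos] at h2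
            rw [(by omega : K + 1 - 1 = (K - 1) + 1), List.getD_cons_succ, h2, hcum', hshare]
            ring
          · have hK0 : K = 0 := by omega
            subst hK0
            rw [(rfl : 0 + 1 - 1 = 0), List.getD_cons_zero]
            have hz : pvSum vals0 den c r.1 v = 0 := by
              apply pvSum_zero
              intro l hl
              have := List.countP_eq_zero.mp hK l hl
              simpa using this
            rw [hz, hcum', hshare]
            ring
        · rw [if_neg (show ¬ (decide (v ≤ c)) = true by simp [hv])]
          have hkn : List.countP (fun l => decide (l ≤ c)) r.1 = 0 := by
            rw [List.countP_eq_zero]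
            intro a ha
            have : v < a := hvt a ((ihmem a).mp ha)
            simp
            omega
          rw [hkn]
          have hz : pvSum vals0 den c r.1 v = 0 := by
            apply pvSum_zero
            intro l hl
            have : v < l := hvt l ((ihmem l).mp hl)
            omega
          simp only [lt_irrefl, if_false, pvSum, if_neg hv, hz, add_zero]

theorem pvBisect_countP (L : List Int) (c : Int) (hL : L.Pairwise (· ≤ ·)) :
    ∀ (n lo hi : Nat), hi - lo ≤ n → lo ≤ hi → hi ≤ L.length →
    (∀ i, i < lo → L.getD i 0 ≤ c) →
    (∀ i, hi ≤ i → i < L.length → ¬ L.getD i 0 ≤ c) →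
    pvBisect L c lo hi = L.countP (fun l => decide (l ≤ c)) := by
  have hmono : ∀ i j, i ≤ j → j < L.length → L.getD i 0 ≤ L.getD j 0 := by
    intro i j hij hj
    rcases Nat.eq_or_lt_of_le hij with rfl | hlt
    · exact le_refl _
    · rw [List.getD_eq_getElem L 0 (lt_trans hlt hj), List.getD_eq_getElem L 0 hj]
      exact List.pairwise_iff_getElem.mp hL i j _ _ hlt
  intro n
  induction n with
  | zero =>
    intro lo hi hfuel hle hlen hlo hhi
    rw [pvBisect, dif_neg (show ¬ lo < hi by omega)]
    -- countP = lo
    have hsplit : L = L.take lo ++ L.drop lo := (List.take_append_drop lo L).symm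
    rw [hsplit, List.countP_append]
    have h1 : (L.take lo).countP (fun l => decide (l ≤ c)) = (L.take lo).length := by
      rw [List.countP_eq_length]
      intro a ha
      obtain ⟨i, hilt, rfl⟩ := List.getElem_of_mem ha
      have hi' : i < hi := by
        have := hilt; rw [List.length_take] at this; omega
      rw [List.getElem_take]
      have := hlo i (by omega)
      rw [List.getD_eq_getElem L 0 (by omega : i < L.length)] at this
      simpa using this
    have h2 : (L.drop lo).countP (fun l => decide (l ≤ c)) = 0 := by
      rw [List.countP_eq_zero]
      intro a ha
      obtain ⟨j, hjlt, rfl⟩ := List.getElem_of_mem ha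
      have hj' : lo + j < L.length := by
        have := hjlt; rw [List.length_drop] at this; omega
      rw [List.getElem_drop]
      have := hhi (lo + j) (by omega) hj'
      rw [List.getD_eq_getElem L 0 hj'] at this
      simpa using this
    rw [h1, h2, List.length_take, Nat.add_zero]
    omega
  | succ n ih =>
    intro lo hi hfuel hle hlen hlo hhi
    by_cases h : lo < hi
    · rw [pvBisect, dif_pos h]
      simp only []
      by_cases hm : L.getD ((lo + hi) / 2) 0 ≤ c
      · rw [if_pos hm]
        refine ih ((lo + hi) / 2 + 1) hi (by omega) (by omega) hlen ?_ hhi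
        intro i hi'
        exact le_trans (hmono i ((lo + hi) / 2) (by omega) (by omega)) hm
      · rw [if_neg hm]
        refine ih lo ((lo + hi) / 2) (by omega) (by omega) (by omega) hlo ?_
        intro i hge hilen hle'
        exact hm (le_trans (hmono ((lo + hi) / 2) i hge hilen) hle')
    · exact ih lo hi (by omega) hle hlen hlo hhi

theorem pvInnerA (elig : List String) (sh : Int) (k : String) :
    ∀ (ws : List String) (p : PySem.Dict String Int),
      (ws.foldl (fun p w => if elig.contains w then p.modify w 0 (fun x => x + sh) else p) p).getD k 0
      = p.getD k 0 + (if elig.contains k then (ws.count k : Int) * sh else 0) := by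
  intro ws
  induction ws with
  | nil => intro p; simp
  | cons w ws ih =>
    intro p
    have hstep : ((if elig.contains w then p.modify w 0 (fun x => x + sh) else p)).getD k 0
        = p.getD k 0 + (if elig.contains w = true ∧ w = k then sh else 0) := by
      by_cases he : elig.contains w = true
      · rw [if_pos he]
        by_cases hwk : w = k
        · subst hwk
          rw [PySem.Dict.getD_modify, if_pos rfl, if_pos ⟨he, rfl⟩]
        · rw [PySem.Dict.getD_modify, if_neg (fun h => hwk h.symm),
            if_neg (fun h => hwk h.2), add_zero]
      · rw [if_neg he, if_neg (fun h => he h.1), add_zero]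
    rw [List.foldl_cons, ih, hstep, List.count_cons]
    by_cases hwk : w = k
    · subst hwk
      rw [if_pos (beq_self_eq_true w)]
      by_cases hck : elig.contains w = true
      · rw [if_pos ⟨hck, rfl⟩, if_pos hck, if_pos hck]; push_cast; ring
      · rw [if_neg (fun h => hck h.1), if_neg hck, if_neg hck]; ring
    · rw [if_neg (fun h => hwk h.2), add_zero, if_neg (show ¬((w == k) = true) by simp [hwk]), Nat.add_zero]

theorem pvInnerA_keys (elig : List String) (sh : Int) :
    ∀ (ws : List String) (p : PySem.Dict String Int),
      (∀ w ∈ elig, w ∈ p.keys) →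
      (ws.foldl (fun p w => if elig.contains w then p.modify w 0 (fun x => x + sh) else p) p).keys = p.keys := by
  intro ws
  induction ws with
  | nil => intro p _; rfl
  | cons w ws ih =>
    intro p hp
    rw [List.foldl_cons]
    by_cases he : elig.contains w = true
    · have hw : w ∈ p.keys := hp w (List.contains_iff_mem.mp he)
      have hkeys : (p.modify w 0 (fun x => x + sh)).keys = p.keys := by
        rw [PySem.Dict.keys_modify, PySem.Dict.keys_insert_of_contains _ _ ((PySem.Dict.contains_iff_mem_keys p w).mpr hw)]
      rw [if_pos he, ih _ (by rw [hkeys]; exact hp), hkeys]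
    · rw [if_neg he, ih _ hp]

theorem pvOuterA (contributions : List (String × Int)) (winners : List String) (k : String) (c : Int)
    (hk : (PySem.Dict.ofList contributions).get? k = some c) :
    ∀ (L : List Int), (∀ l ∈ L, l ∈ (PySem.Dict.ofList contributions).values) →
    ∀ (p : PySem.Dict String Int) (prev : Int),
      p.keys = (PySem.Dict.ofList contributions).keys →
      ((L.foldl (pvStepA (PySem.Dict.ofList contributions) winners) (p, prev)).1.getD k 0
        = p.getD k 0 + (winners.count k : Int)
            * pvSum (PySem.Dict.ofList contributions).values (max 1 (winners.length : Int)) c L prev)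
      ∧ (L.foldl (pvStepA (PySem.Dict.ofList contributions) winners) (p, prev)).1.keys = p.keys := by
  set d := PySem.Dict.ofList contributions with hd
  have hnodup : d.keys.Nodup := PySem.Dict.nodup_keys_ofList contributions
  intro L
  induction L with
  | nil =>
    intro _ p prev _
    exact ⟨by simp [pvSum], rfl⟩
  | cons l L ihL =>
    intro hL p prev hpk
    have hlv : l ∈ d.values := hL l (by simp)
    obtain ⟨pc, hpc, hpcl⟩ := List.mem_map.mp hlv
    have hfl : pc ∈ d.items.filter (fun pc => decide (l ≤ pc.2)) :=
      List.mem_filter.mpr ⟨hpc, by simp [hpcl]⟩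
    set eligible := (d.items.filter (fun pc => decide (l ≤ pc.2))).map (fun pc => pc.1) with helig
    have hne : eligible ≠ [] := by
      intro h
      have : pc.1 ∈ eligible := by
        rw [helig]; exact List.mem_map_of_mem hfl
      rw [h] at this
      cases this
    set share := PySem.Int.floordiv ((l - prev) * (eligible.length : Int)) (max 1 (winners.length : Int)) with hshare
    have hstep_eq : pvStepA d winners (p, prev) l
        = (winners.foldl (fun p w => if eligible.contains w then p.modify w 0 (fun x => x + share) else p) p, l) := by
      simp only [pvStepA]
      rw [← helig, if_neg hne, ← hshare]
    have hcont : eligible.contains k = true ↔ l ≤ c := by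
      constructor
      · intro h
        obtain ⟨qc, hqc, hqk⟩ := List.mem_map.mp (List.contains_iff_mem.mp h)
        obtain ⟨hqmem, hql⟩ := List.mem_filter.mp hqc
        have : d.get? qc.1 = some qc.2 := PySem.Dict.get?_of_mem_items d (by rw [← Prod.mk.eta (p := qc)] at hqmem; exact hqmem) hnodup
        rw [hqk] at this
        rw [hk] at this
        have hc : qc.2 = c := by injection this with hh; exact hh.symm
        rw [hc] at hql
        simpa using hql
      · intro h
        have hmem : (k, c) ∈ d.items := PySem.Dict.mem_items_of_get?_eq_some d hk
        have : (k, c) ∈ d.items.filter (fun pc => decide (l ≤ pc.2)) :=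
          List.mem_filter.mpr ⟨hmem, by simpa using h⟩
        exact List.contains_iff_mem.mpr (by rw [helig]; exact List.mem_map_of_mem this)
    have helig_sub : ∀ w ∈ eligible, w ∈ p.keys := by
      intro w hw
      obtain ⟨qc, hqc, hqk⟩ := List.mem_map.mp hw
      have : qc.1 ∈ d.keys := List.mem_map_of_mem (List.mem_filter.mp hqc).1
      rw [hpk, ← hqk]
      exact this
    have hlen2 : (eligible.length : Int) = pvElig d.values l := by
      rw [helig, List.length_map, ← List.countP_eq_length_filter, pvElig]
      unfold PySem.Dict.values
      rw [List.countP_map]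
      rfl
    have hkeys_inner : (winners.foldl (fun p w => if eligible.contains w then p.modify w 0 (fun x => x + share) else p) p).keys = p.keys :=
      pvInnerA_keys eligible share winners p helig_sub
    rw [List.foldl_cons, hstep_eq]
    obtain ⟨ih1, ih2⟩ := ihL (fun x hx => hL x (by simp [hx]))
      (winners.foldl (fun p w => if eligible.contains w then p.modify w 0 (fun x => x + share) else p) p) l
      (by rw [hkeys_inner, hpk])
    refine ⟨?_, by rw [ih2, hkeys_inner]⟩
    rw [ih1, pvInnerA eligible share k winners p]
    show p.getD k 0 + _ + _ = p.getD k 0 + (winners.count k : Int) * pvSum d.values (max 1 (winners.length : Int)) c (l :: L) prev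
    simp only [pvSum]
    by_cases hlc : l ≤ c
    · rw [if_pos (hcont.mpr hlc), if_pos hlc]
      rw [hshare, hlen2]
      ring
    · rw [if_neg (fun h => hlc (hcont.mp h)), if_neg hlc]
      ring

-- ===== VERDICT (by name: the statement is the Claim_ definition above) =====
theorem distribute_side_pots_spec : Claim_equal_distribute_side_pots := by
  unfold Claim_equal_distribute_side_pots
  intro contributions winners _dom
  unfold Spec_distribute_side_pots
  simp only [distribute_side_pots, distribute_side_pots_alt]
  set d := PySem.Dict.ofList contributions with hd
  have hnodup : d.keys.Nodup := PySem.Dict.nodup_keys_ofList contributions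
  set den : Int := max 1 (winners.length : Int) with hden
  set vals := PySem.List.sorted d.values (fun x => x) with hvals
  set rows := pvRows den vals 0 0 with hrows
  have hperm : vals.Perm d.values := PySem.List.sorted_perm d.values (fun x => x) false
  have hPW : vals.Pairwise (· ≤ ·) := by
    have := PySem.List.sorted_pairwise d.values (fun x => x)
    simpa using this
  obtain ⟨hmemL, hPWlt, hcums⟩ :=
    pvRows_spec d.values den vals.length vals le_rfl hPW
      (fun l _ => (hperm.countP_eq _).symm) 0 0
  rw [← hrows] at hmemL hPWlt hcums
  have hLnodup : rows.1.Nodup := hPWlt.imp (fun h => ne_of_lt h)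
  have hLeq : PySem.List.sorted (PySem.Set.ofList d.values) (fun x => x) = rows.1 := by
    apply PySem.List.sorted_eq_of_perm_of_pairwise_lt
    · rw [List.perm_ext_iff_of_nodup hLnodup (PySem.Set.nodup_ofList d.values)]
      intro a
      rw [PySem.Set.mem_ofList, hmemL a]
      exact PySem.List.mem_sorted d.values (fun x => x) false a
    · simpa using hPWlt
  by_cases hnil : d.items = []
  · rw [if_pos hnil, hnil, List.foldl_nil]
    rfl
  · rw [if_neg hnil]
    -- A's zeroed payout dict
    set payouts0 := d.keys.foldl (fun (p : PySem.Dict String Int) pid => p.insert pid 0) PySem.Dict.empty with hp0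
    have hp0items : payouts0.items = d.keys.map (fun x => (x, (0 : Int))) := by
      rw [hp0]
      have := PySem.Dict.items_foldl_insert_fresh d.keys (fun x => x) (fun _ => (0 : Int))
        PySem.Dict.empty (fun a _ => PySem.Dict.contains_empty a) (by simpa using hnodup)
      simpa using this
    have hp0keys : payouts0.keys = d.keys := by
      show payouts0.items.map (fun p => p.1) = d.keys
      rw [hp0items, List.map_map]
      simp [Function.comp_def]
    have hp0nodup : payouts0.keys.Nodup := by rw [hp0keys]; exact hnodup
    have hp0getD : ∀ x ∈ d.keys, payouts0.getD x 0 = 0 := by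
      intro x hx
      exact PySem.Dict.getD_of_mem_items payouts0
        (by rw [hp0items]; exact List.mem_map_of_mem hx) hp0nodup 0
    set L := PySem.List.sorted (PySem.Set.ofList d.values) (fun x => x) with hL
    have hLsub : ∀ l ∈ L, l ∈ d.values := by
      intro l hl
      rw [hL, PySem.List.mem_sorted, PySem.Set.mem_ofList] at hl
      exact hl
    set r := L.foldl (pvStepA d winners) (payouts0, 0) with hr
    -- keys of the final payout dict
    obtain ⟨p0, hp0mem⟩ := List.exists_mem_of_ne_nil d.items hnil
    have hk0 : d.get? p0.1 = some p0.2 :=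
      PySem.Dict.get?_of_mem_items d (by rw [Prod.mk.eta]; exact hp0mem) hnodup
    have hkeysr : r.1.keys = d.keys := by
      rw [hr, (pvOuterA contributions winners p0.1 p0.2 hk0 L hLsub payouts0 0 hp0keys).2, hp0keys]
    have hrnodup : r.1.keys.Nodup := by rw [hkeysr]; exact hnodup
    rw [PySem.Dict.items_eq_map_keys r.1 hrnodup 0, hkeysr]
    -- B's output dict
    set wins := winners.foldl (fun (w : PySem.Dict String Int) x => w.insert x (w.getD x 0 + 1)) PySem.Dict.empty with hwins
    have houtitems :
        (d.items.foldl (fun (o : PySem.Dict String Int) pc =>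
            o.insert pc.1 (wins.getD pc.1 0 *
              (if 0 < pvBisect rows.1 pc.2 0 rows.1.length then
                 rows.2.getD (pvBisect rows.1 pc.2 0 rows.1.length - 1) 0 else 0)))
          PySem.Dict.empty).items
        = d.items.map (fun pc => (pc.1, wins.getD pc.1 0 *
            (if 0 < pvBisect rows.1 pc.2 0 rows.1.length then
               rows.2.getD (pvBisect rows.1 pc.2 0 rows.1.length - 1) 0 else 0))) := by
      have := PySem.Dict.items_foldl_insert_fresh d.items (fun pc => pc.1)
        (fun pc => wins.getD pc.1 0 *
          (if 0 < pvBisect rows.1 pc.2 0 rows.1.length then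
             rows.2.getD (pvBisect rows.1 pc.2 0 rows.1.length - 1) 0 else 0))
        PySem.Dict.empty (fun a _ => PySem.Dict.contains_empty a.1)
        (by simpa [PySem.Dict.keys] using hnodup)
      simpa using this
    rw [houtitems, PySem.Dict.items_eq_map_keys d hnodup 0, List.map_map]
    apply List.map_congr_left
    intro k hkmem
    -- the stored value of k in d
    have hqne : d.get? k ≠ none := by
      intro h
      rw [PySem.Dict.get?_eq_none_iff_not_mem_keys] at h
      exact h hkmem
    obtain ⟨c, hq⟩ : ∃ c, d.get? k = some c := by
      cases hqc : d.get? k with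
      | none => exact absurd hqc hqne
      | some c => exact ⟨c, rfl⟩
    have hgetD : d.getD k 0 = c := PySem.Dict.getD_of_get?_eq_some d 0 hq
    -- A's payout for k
    have hA := (pvOuterA contributions winners k c hq L hLsub payouts0 0 hp0keys).1
    rw [hp0getD k hkmem, zero_add] at hA
    -- B's payout for k
    have hwinsD : wins.getD k 0 = (winners.count k : Int) := by
      rw [hwins, PySem.Dict.getD_foldl_insert_add_one]
      simp
    have hbis : pvBisect rows.1 c 0 rows.1.length = rows.1.countP (fun l => decide (l ≤ c)) := by
      refine pvBisect_countP rows.1 c (hPWlt.imp (fun h => le_of_lt h)) rows.1.length 0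
        rows.1.length (by omega) (by omega) le_rfl (fun i h => absurd h (by omega)) ?_
      intro i hge hlt
      omega
    have hXc : (if 0 < pvBisect rows.1 c 0 rows.1.length then
        rows.2.getD (pvBisect rows.1 c 0 rows.1.length - 1) 0 else 0)
        = pvSum d.values den c rows.1 0 := by
      rw [hbis]
      have := hcums c
      rw [this]
      simp
    simp only [Function.comp_def]
    rw [hgetD, hXc, hwinsD, hA, hLeq]
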